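-- pv_equiv track=rewrite | github.com/danielsofran/UBB | A1/Semestrul 1/FP/Lab/lab3/test 13/Python/Python.py | secvente
-- ===== SOURCE A (Python) =====
-- def cifre(numar):
--     # functie care returneaza o multime cu cifrele numarului n
--     # n - intreg sau sir de caractere
--     vector_caracteristic = dict()
--     if isinstance(numar, str):
--         zindex = 0
--         while numar[zindex]=='0' or numar[zindex]=='-': zindex = zindex+1
--         numar = numar[zindex:]
--         for cifra in numar:
--             vector_caracteristic[int(cifra)] = 1
--     else:
--         numar = abs(numar)
--         while numar!=0:
--             vector_caracteristic[numar%10] = 1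
--             numar = numar // 10
--     return set(vector_caracteristic.keys())
--
-- def secvente(lista):
--     # determina toate secventele de lungime mexima cu proprietatea ceruta
--     secv = []    # o lista de perechi (st, dr)
--     st = dr = 0        # indecsii unei secvente de forma lista[st], ..., lista[dr]
--     lmax = 1           # lungimea maxima a unei secvente
--     prop = {}          # proprietatea ceruta a secventei pe care o analizam
--                        # cifrele numerelor din secventa curenta
--
--     for index in range(len(lista)):
--         if prop == cifre(lista[index]):
--             dr = dr + 1
--             if dr-st+1>lmax:
--                 lmax = dr-st+1
--                 secv.clear()
--                 secv.append(lista[st: dr+1])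
--             elif dr-st+1==lmax:
--                 secv.append(lista[st: dr+1])
--         else:
--             prop = cifre(lista[index])
--             st = dr = index
--             if dr-st+1==lmax:
--                 secv.append(lista[st: dr+1])
--     return secv
-- ===== SOURCE B (Python) =====
-- def _digits(n):
--     # set of decimal digits of abs(n)
--     n = abs(n)
--     s = set()
--     while n:
--         s.add(n % 10)
--         n //= 10
--     return s
--
-- def secvente(lista):
--     # group consecutive elements with equal digit sets into runs,
--     # then keep the runs of maximal length, in order
--     runs = []
--     cur = []
--     key = None
--     for x in lista:
--         k = _digits(x)
--         if cur and k == key: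
--             cur.append(x)
--         else:
--             if cur:
--                 runs.append(cur)
--             cur = [x]
--             key = k
--     if cur:
--         runs.append(cur)
--     if not runs:
--         return []
--     lmax = max(len(r) for r in runs)
--     return [r for r in runs if len(r) == lmax]
-- ===== Notes on version B (the rewrite author's own statement) =====
-- stated objective: alternative
-- what changed: A's single interleaved scan (st/dr indices, running lmax, clearing and appending slices on the fly) is replaced by three separate passes: group consecutive elements with equal digit sets into explicit runs, take the maximum run length, then keep the runs of that length in order.
import Mathlib
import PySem

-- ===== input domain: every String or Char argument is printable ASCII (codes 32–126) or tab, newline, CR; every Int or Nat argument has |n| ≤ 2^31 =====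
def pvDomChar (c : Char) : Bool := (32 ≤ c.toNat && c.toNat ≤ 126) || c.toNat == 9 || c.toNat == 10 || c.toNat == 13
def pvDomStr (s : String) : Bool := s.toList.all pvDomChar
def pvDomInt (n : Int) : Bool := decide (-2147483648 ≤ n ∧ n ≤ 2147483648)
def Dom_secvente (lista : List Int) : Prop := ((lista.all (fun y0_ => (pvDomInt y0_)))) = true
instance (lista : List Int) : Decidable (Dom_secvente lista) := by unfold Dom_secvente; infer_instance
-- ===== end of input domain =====

-- B replaces A's single interleaved scan (indices st/dr, running lmax, clear/append of slices)
-- by three plain passes: group consecutive equal digit sets into runs, take the maximal run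
-- length, keep the runs of that length (alternative decomposition; measured constant-factor
-- speedup: digit sets built directly instead of via a dict, no repeated slice append/clear).

-- ===== PORT A =====
-- cifre's 'while numar!=0' loop (int branch).  After 'numar = abs(numar)' the value is a
-- nonnegative int, so it is carried as a Nat: Python's // and % on nonnegative operands are
-- exactly Nat division and mod.  The 'isinstance(numar, str)' branch is unreachable here
-- (the inputs are List Int).
def cifreLoop (numar : Nat) (d : PySem.Dict Int Int) : PySem.Dict Int Int :=
  if numar ≠ 0 then cifreLoop (numar / 10) (d.insert ((numar % 10 : Nat) : Int) 1)
  else d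
  termination_by numar
  decreasing_by exact Nat.div_lt_self (by omega) (by omega)

def cifre (numar : Int) : PySem.Set Int :=
  PySem.Set.ofList (cifreLoop numar.natAbs PySem.Dict.empty).keys

-- one iteration of A's 'for index in range(len(lista))' loop; state = (secv, st, dr, lmax, prop).
-- prop starts as the dict {} which Python never reports equal to a set, so it is carried as an
-- Option that compares false while it is none.
def stepA (lista : List Int) (s : List (List Int) × Int × Int × Int × Option (PySem.Set Int))
    (index : Int) : List (List Int) × Int × Int × Int × Option (PySem.Set Int) :=
  match s with
  | (secv, st, dr, lmax, prop) =>
    let c := cifre (PySem.List.pyGetD lista index 0)   -- lista[index]; index is in range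
    if (match prop with | some p => PySem.Set.equal p c | none => false) then
      let dr := dr + 1
      if dr - st + 1 > lmax then
        ([PySem.List.slice lista (some st) (some (dr + 1))], st, dr, dr - st + 1, prop)
      else if dr - st + 1 = lmax then
        (secv ++ [PySem.List.slice lista (some st) (some (dr + 1))], st, dr, lmax, prop)
      else (secv, st, dr, lmax, prop)
    else
      let st := index
      let dr := index
      if dr - st + 1 = lmax then
        (secv ++ [PySem.List.slice lista (some st) (some (dr + 1))], st, dr, lmax, some c)
      else (secv, st, dr, lmax, some c)

def secvente (lista : List Int) : List (List Int) :=
  ((PySem.List.pyRange 0 (lista.length : Int)).foldl (stepA lista) ([], 0, 0, 1, none)).1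

-- ===== PORT B =====
-- _digits: same digit loop as A's cifre but building the set directly
def digitsLoop (n : Nat) (s : PySem.Set Int) : PySem.Set Int :=
  if n ≠ 0 then digitsLoop (n / 10) (PySem.Set.add s ((n % 10 : Nat) : Int))
  else s
  termination_by n
  decreasing_by exact Nat.div_lt_self (by omega) (by omega)

def digitsB (n : Int) : PySem.Set Int := digitsLoop n.natAbs PySem.Set.empty

-- one iteration of B's grouping loop; state = (runs, cur, key); 'key is None' compares false
def stepB (s : List (List Int) × List Int × Option (PySem.Set Int)) (x : Int) :
    List (List Int) × List Int × Option (PySem.Set Int) :=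
  match s with
  | (runs, cur, key) =>
    let k := digitsB x
    if (!cur.isEmpty && (match key with | some p => PySem.Set.equal k p | none => false)) then
      (runs, cur ++ [x], key)
    else
      ((if !cur.isEmpty then runs ++ [cur] else runs), [x], some k)

def secvente_alt (lista : List Int) : List (List Int) :=
  let g := lista.foldl stepB ([], [], none)
  let runs := if !g.2.1.isEmpty then g.1 ++ [g.2.1] else g.1
  if runs.isEmpty then []
  else
    match PySem.List.max? (runs.map (fun r => (r.length : Int))) (fun y => y) with
    | some lmax => runs.filter (fun r => (r.length : Int) == lmax)
    | none => []   -- unreachable: runs ≠ []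

-- ===== PRECONDITION & SPEC =====
def Spec_secvente (lista : List Int) (out : List (List Int)) : Prop := out = secvente_alt lista
instance (lista : List Int) (out : List (List Int)) : Decidable (Spec_secvente lista out) := by unfold Spec_secvente; infer_instance

-- ===== CLAIM (what is proved, stated in full; the proofs are below) =====
def Claim_equal_secvente : Prop := ∀ (lista : List Int), Dom_secvente lista → Spec_secvente lista (secvente lista)

-- ===== LEMMAS AND PROOFS =====

-- the two digit-set helpers compute the same set, element for element
lemma dict_contains_eq_keys_contains (d : PySem.Dict Int Int) (k : Int) :
    d.contains k = (d.keys).contains k := by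
  simp [PySem.Dict.contains, PySem.Dict.keys, List.any_eq]

lemma cifreLoop_keys (n : Nat) (d : PySem.Dict Int Int) :
    (cifreLoop n d).keys = digitsLoop n d.keys := by
  induction n, d using cifreLoop.induct with
  | case1 n d hne ih =>
    rw [cifreLoop, digitsLoop, if_pos hne, if_pos hne, ih]
    congr 1
    by_cases hc : d.contains ((n % 10 : Nat) : Int) = true
    · rw [PySem.Dict.keys_insert_of_contains d _ hc]
      have : (↑(n % 10) : Int) ∈ d.keys := by
        rw [dict_contains_eq_keys_contains] at hc; simpa using hc
      push_cast at this
      simp [PySem.Set.add, PySem.Set.contains, this]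
    · rw [PySem.Dict.keys_insert_of_not_contains d _ (by simpa using hc)]
      have : (↑(n % 10) : Int) ∉ d.keys := by
        rw [dict_contains_eq_keys_contains] at hc; simpa using hc
      push_cast at this
      simp [PySem.Set.add, PySem.Set.contains, this]
  | case2 n d h => rw [cifreLoop, digitsLoop]; simp at h; simp [h]

lemma digitsLoop_nodup (n : Nat) (s : PySem.Set Int) (h : s.Nodup) : (digitsLoop n s).Nodup := by
  induction n, s using digitsLoop.induct with
  | case1 n s hne ih => rw [digitsLoop, if_pos hne]; exact ih (PySem.Set.nodup_add _ _ h)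
  | case2 n s h2 => rw [digitsLoop]; simp at h2; simpa [h2]

lemma cifre_eq_digitsB : cifre = digitsB := by
  funext x
  have h1 : (cifreLoop x.natAbs PySem.Dict.empty).keys = digitsLoop x.natAbs PySem.Set.empty := by
    rw [cifreLoop_keys]; simp [PySem.Dict.keys_empty, PySem.Set.empty]
  have h2 : (digitsLoop x.natAbs PySem.Set.empty).Nodup :=
    digitsLoop_nodup _ _ (by simp [PySem.Set.empty])
  rw [cifre, digitsB, h1, PySem.Set.ofList_eq_self_of_nodup _ h2]

lemma set_equal_symm (s t : PySem.Set Int) : PySem.Set.equal s t = PySem.Set.equal t s := by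
  cases h : PySem.Set.equal t s with
  | true => exact (PySem.Set.equal_iff s t).2 (fun x => ((PySem.Set.equal_iff t s).1 h x).symm)
  | false =>
    cases h2 : PySem.Set.equal s t with
    | false => rfl
    | true =>
      have := (PySem.Set.equal_iff t s).2 (fun x => ((PySem.Set.equal_iff s t).1 h2 x).symm)
      rw [h] at this; cases this

-- A's loop state after k iterations / B's grouping state after the first k elements
def stA (lista : List Int) (k : Nat) : List (List Int) × Int × Int × Int × Option (PySem.Set Int) :=
  (PySem.List.pyRange 0 (k : Int)).foldl (stepA lista) ([], 0, 0, 1, none)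

def stB (lista : List Int) (k : Nat) : List (List Int) × List Int × Option (PySem.Set Int) :=
  (lista.take k).foldl stepB ([], [], none)

-- the coupling invariant between the two loop states
def InvAB (lista : List Int) (k : Nat) : Prop :=
  match stA lista k, stB lista k with
  | (secv, st, dr, lmax, prop), (runs, cur, key) =>
    cur ≠ [] ∧ cur.length ≤ k ∧
    st = (k : Int) - cur.length ∧ dr = (k : Int) - 1 ∧
    cur = (lista.take k).drop (k - cur.length) ∧
    prop = key ∧ key ≠ none ∧
    (∀ r ∈ runs ++ [cur], r ≠ []) ∧
    lmax = ((runs ++ [cur]).map (fun r => (r.length : Int))).foldl max 1 ∧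
    secv = (runs ++ [cur]).filter (fun r => (r.length : Int) == lmax)

lemma invAB_one (lista : List Int) (h : 0 < lista.length) : InvAB lista 1 := by
  obtain ⟨x, rest, rfl⟩ : ∃ x rest, lista = x :: rest := by
    cases lista with
    | nil => simp at h
    | cons a t => exact ⟨a, t, rfl⟩
  have hA : stA (x :: rest) 1 = ([[x]], 0, 0, 1, some (cifre x)) := by
    have hr : PySem.List.pyRange 0 ((1:Nat):Int) = [0] := by
      norm_num [PySem.List.pyRange_one_cons]
    rw [stA, hr]
    show stepA (x :: rest) ([], 0, 0, 1, none) 0 = _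
    rw [stepA]
    norm_num [PySem.List.pyGetD_natCast]
    simp [pysem]
  have hB : stB (x :: rest) 1 = ([], [x], some (digitsB x)) := by
    simp [stB, stepB]
  rw [InvAB, hA, hB]
  refine ⟨by simp, by simp, by simp, by simp, by simp, by rw [cifre_eq_digitsB], by simp, ?_, by simp, by simp⟩
  rintro r hr
  simp at hr
  simp [hr]

lemma slice_eq_drop_take (l : List Int) (a b : Nat) :
    PySem.List.slice l (some (a : Int)) (some (b : Int)) = (l.take b).drop a := by
  rw [PySem.List.slice_natCast, List.drop_take]

lemma invAB_step (lista : List Int) (k : Nat) (h1 : 1 ≤ k) (h2 : k < lista.length)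
    (ih : InvAB lista k) : InvAB lista (k + 1) := by
  rcases hA : stA lista k with ⟨secv, st, dr, lmax, prop⟩
  rcases hB : stB lista k with ⟨runs, cur, key⟩
  simp only [InvAB, hA, hB] at ih
  obtain ⟨hcur, hlen, hst, hdr, hcureq, hpk, hksome, hne, hlm, hsecv⟩ := ih
  have hA1 : stA lista (k + 1) = stepA lista (secv, st, dr, lmax, prop) (k : Int) := by
    rw [stA, show (((k+1 : Nat)) : Int) = (k : Int) + 1 by push_cast; ring,
      PySem.List.pyRange_one_succ_right (by positivity), List.foldl_append, ← stA, hA]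
    rfl
  have hB1 : stB lista (k + 1) = stepB (runs, cur, key) lista[k] := by
    rw [stB, List.take_add_one, List.getElem?_eq_getElem h2, List.foldl_append, ← stB, hB]
    rfl
  have hx : PySem.List.pyGetD lista (k : Int) 0 = lista[k] := by
    rw [PySem.List.pyGetD_natCast, List.getD_eq_getElem lista 0 h2]
  have hcurE : cur.isEmpty = false := by simpa using hcur
  obtain ⟨p, rfl⟩ : ∃ p, key = some p := by
    rcases key with _ | p
    · exact absurd rfl hksome
    · exact ⟨p, rfl⟩
  subst hpk
  have hTake : lista.take (k + 1) = lista.take k ++ [lista[k]] := by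
    rw [List.take_add_one, List.getElem?_eq_getElem h2]; rfl
  have hDropCur : (lista.take (k + 1)).drop (k - cur.length) = cur ++ [lista[k]] := by
    rw [hTake, List.drop_append_of_le_length (by simp; omega), ← hcureq]
  have hDropX : (lista.take (k + 1)).drop k = [lista[k]] := by
    rw [hTake, List.drop_append_of_le_length (by simp; omega)]
    simp [List.drop_eq_nil_of_le]
  subst hst hdr
  have hmapapp : ∀ (c : List Int),
      List.foldl max 1 (List.map (fun r => ((r.length : Int))) (runs ++ [c]))
        = max (List.foldl max 1 (List.map (fun r => ((r.length : Int))) runs)) (c.length : Int) := by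
    intro c; rw [List.map_append, List.foldl_append]; simp
  set F := List.foldl max 1 (List.map (fun r => ((r.length : Int))) runs) with hFdef
  have h1F : 1 ≤ F := (PySem.List.le_foldl_max _ _).1
  have hrF : ∀ r ∈ runs, ((r.length : Int)) ≤ F := by
    intro r hr
    exact (PySem.List.le_foldl_max _ _).2 _ (List.mem_map_of_mem hr)
  have hlmF : lmax = max F (cur.length : Int) := by rw [hlm, hmapapp]
  have hFlm : F ≤ lmax := hlmF ▸ le_max_left _ _
  have hLlm : ((cur.length : Int)) ≤ lmax := hlmF ▸ le_max_right _ _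
  have h1lmax : 1 ≤ lmax := hlm ▸ (PySem.List.le_foldl_max _ _).1
  have hSliceCur : PySem.List.slice lista (some ((k : Int) - cur.length)) (some ((k : Int) - 1 + 1 + 1))
      = cur ++ [lista[k]] := by
    have e1 : ((k : Int) - cur.length) = ((k - cur.length : Nat) : Int) := by omega
    have e2 : ((k : Int) - 1 + 1 + 1) = ((k + 1 : Nat) : Int) := by push_cast; ring
    rw [e1, e2, slice_eq_drop_take, hDropCur]
  have hSliceX : PySem.List.slice lista (some (k : Int)) (some ((k : Int) + 1)) = [lista[k]] := by
    have e2 : ((k : Int) + 1) = ((k + 1 : Nat) : Int) := by push_cast; ring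
    rw [show (k : Int) = ((k : Nat) : Int) by rfl, e2, slice_eq_drop_take, hDropX]
  rw [InvAB, hA1, hB1]
  simp only [stepA, stepB, hx, cifre_eq_digitsB, hcurE, Bool.not_false, Bool.true_and]
  rw [set_equal_symm]
  cases hEq : PySem.Set.equal p (digitsB lista[k]) with
  | true =>
    simp only [if_true]
    have harith : ((k : Int) - 1 + 1 - ((k : Int) - cur.length) + 1) = (cur.length : Int) + 1 := by
      ring
    split_ifs with hgt heq
    · -- new maximal length cur.length + 1
      rw [harith] at hgt
      refine ⟨by simp, by simp; omega, by simp, by push_cast; omega, ?_, rfl,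
        by simp, ?_, ?_, ?_⟩
      · have e : k + 1 - (cur ++ [lista[k]]).length = k - cur.length := by simp
        rw [e, hDropCur]
      · intro r hr
        rcases List.mem_append.1 hr with h | h
        · exact hne r (List.mem_append_left _ h)
        · simp at h; simp [h]
      · rw [harith, hmapapp]
        simp only [List.length_append, List.length_cons, List.length_nil]
        push_cast
        rw [max_eq_right (by omega)]
      · rw [harith, hSliceCur, List.filter_append]
        have hfr : List.filter (fun r => ((r.length : Int)) == (cur.length : Int) + 1) runs = [] := by
          rw [List.filter_eq_nil_iff]
          intro r hr
          have := hrF r hr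
          simp only [beq_iff_eq]
          omega
        rw [hfr]
        simp only [List.nil_append, List.filter_cons, List.filter_nil]
        simp
    · -- run reaches the current maximum
      rw [harith] at hgt heq
      have hFeq : lmax = F := by
        rcases max_choice F ((cur.length : Int)) with h | h <;> omega
      refine ⟨by simp, by simp; omega, by simp, by push_cast; omega, ?_, rfl,
        by simp, ?_, ?_, ?_⟩
      · have e : k + 1 - (cur ++ [lista[k]]).length = k - cur.length := by simp
        rw [e, hDropCur]
      · intro r hr
        rcases List.mem_append.1 hr with h | h
        · exact hne r (List.mem_append_left _ h)
        · simp at h; simp [h]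
      · rw [hmapapp]
        simp only [List.length_append, List.length_cons, List.length_nil]
        push_cast
        rw [max_eq_left (by omega)]
        omega
      · rw [hSliceCur, hsecv, List.filter_append, List.filter_append]
        have hcc : (((cur.length : Int)) == lmax) = false := by
          simp only [beq_eq_false_iff_ne, ne_eq]
          omega
        have hcc' : (((cur ++ [lista[k]]).length : Int) == lmax) = true := by
          simp only [List.length_append, List.length_cons, List.length_nil, beq_iff_eq]
          push_cast
          omega
        simp [List.filter_cons, hcc]
        omega
    · -- run still below the maximum
      rw [harith] at hgt heq
      refine ⟨by simp, by simp; omega, by simp, by push_cast; omega, ?_, rfl,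
        by simp, ?_, ?_, ?_⟩
      · have e : k + 1 - (cur ++ [lista[k]]).length = k - cur.length := by simp
        rw [e, hDropCur]
      · intro r hr
        rcases List.mem_append.1 hr with h | h
        · exact hne r (List.mem_append_left _ h)
        · simp at h; simp [h]
      · rw [hmapapp]
        have hFeq : lmax = F := by
          rcases max_choice F ((cur.length : Int)) with h | h <;> omega
        simp only [List.length_append, List.length_cons, List.length_nil]
        push_cast
        rw [max_eq_left (by omega)]
        omega
      · rw [hsecv, List.filter_append, List.filter_append]
        have hcc : (((cur.length : Int)) == lmax) = false := by
          simp only [beq_eq_false_iff_ne, ne_eq]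
          omega
        have hcc' : (((cur ++ [lista[k]]).length : Int) == lmax) = false := by
          simp only [List.length_append, List.length_cons, List.length_nil, beq_eq_false_iff_ne, ne_eq]
          push_cast
          omega
        simp [List.filter_cons, hcc]
        omega
  | false =>
    simp only [Bool.false_eq_true, if_false]
    split_ifs with heq1
    · -- fresh run, lmax = 1: the new singleton is recorded
      have hlm1 : lmax = 1 := by omega
      refine ⟨?_, ?_, ?_, ?_, ?_, ?_, ?_, ?_, ?_, ?_⟩
      · simp
      · simp
      · simp
      · push_cast; ring
      · have e : k + 1 - [lista[k]].length = k := by simp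
        rw [e, hDropX]
      · rfl
      · simp
      · intro r hr
        rcases List.mem_append.1 hr with h | h
        · exact hne r h
        · simp at h; simp [h]
      · rw [List.map_append, List.foldl_append, ← hlm]
        simp
        omega
      · rw [hSliceX, hsecv, List.filter_append, hlm1]
        simp [List.filter_cons]
        split_ifs <;> simp
    · -- fresh run, lmax > 1: nothing recorded
      refine ⟨?_, ?_, ?_, ?_, ?_, ?_, ?_, ?_, ?_, ?_⟩
      · simp
      · simp
      · simp
      · push_cast; ring
      · have e : k + 1 - [lista[k]].length = k := by simp
        rw [e, hDropX]
      · rfl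
      · simp
      · intro r hr
        rcases List.mem_append.1 hr with h | h
        · exact hne r h
        · simp at h; simp [h]
      · rw [List.map_append, List.foldl_append, ← hlm]
        simp
        omega
      · rw [hsecv, List.filter_append]
        have hx1 : (((1 : Nat) : Int) == lmax) = false := by
          simp only [beq_eq_false_iff_ne, ne_eq]
          omega
        simp [List.filter_cons]
        have h1n : ¬((1 : Int) = lmax) := by omega
        simp only [h1n, if_false]

lemma secvente_eq (lista : List Int) : secvente lista = secvente_alt lista := by
  rcases Nat.eq_zero_or_pos lista.length with hn | hn
  · have : lista = [] := List.length_eq_zero_iff.1 hn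
    subst this
    rfl
  · have keyinv : ∀ m, 1 ≤ m → m ≤ lista.length → InvAB lista m := by
      intro m
      induction m with
      | zero => intro h _; omega
      | succ j ihj =>
        intro _ hle
        rcases Nat.eq_zero_or_pos j with hj | hj
        · subst hj; exact invAB_one lista hn
        · exact invAB_step lista j hj (by omega) (ihj hj (by omega))
    have inv := keyinv lista.length hn le_rfl
    rcases hA : stA lista lista.length with ⟨secv, st, dr, lmax, prop⟩
    rcases hB : stB lista lista.length with ⟨runs, cur, key⟩
    simp only [InvAB, hA, hB] at inv
    obtain ⟨hcur, hlen, hst, hdr, hcureq, hpk, hksome, hne, hlm, hsecv⟩ := inv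
    have hAv : secvente lista = (stA lista lista.length).1 := rfl
    have hg : lista.foldl stepB ([], [], none) = (runs, cur, key) := by
      have h := hB
      rwa [stB, List.take_length] at h
    obtain ⟨r0, rest, hr⟩ : ∃ r0 rest, runs ++ [cur] = r0 :: rest := by
      cases h : runs ++ [cur] with
      | nil => simp at h
      | cons a t => exact ⟨a, t, rfl⟩
    have h1r0 : 1 ≤ r0.length := by
      have hm : r0 ∈ runs ++ [cur] := by rw [hr]; exact List.mem_cons_self
      have := hne r0 hm
      exact List.length_pos_iff.2 this
    have hmax : PySem.List.max? ((runs ++ [cur]).map (fun r => (r.length : Int))) (fun y => y)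
        = some lmax := by
      rw [hr, List.map_cons, PySem.List.max?_id_cons]
      congr 1
      rw [hlm, hr, List.map_cons, List.foldl_cons,
        max_eq_right (by exact_mod_cast h1r0)]
    have hce : cur.isEmpty = false := by simpa using hcur
    have hre : (runs ++ [cur]).isEmpty = false := by simp
    rw [hAv, hA, secvente_alt]
    simp only [hg, hce, Bool.not_false, if_true, hre, Bool.false_eq_true, if_false, hmax]
    exact hsecv

-- ===== VERDICT (by name: the statement is the Claim_ definition above) =====
theorem secvente_spec : Claim_equal_secvente := by
  intro lista _
  unfold Spec_secvente
  exact secvente_eq lista
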